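-- pv_equiv track=rewrite | github.com/ImportTaste/imageDiff | based.py | b2encode
-- ===== SOURCE A (Python) =====
-- def b2encode(text):
--
--     out = ""
--     for i in text:
--         tmp = bin(ord(i))[2:]
--         while len(tmp) < 7:
--             tmp = "0" + tmp
--         out += tmp
--     return out
-- ===== SOURCE B (Python) =====
-- def b2encode(text):
--     pieces = []
--     for c in text:
--         o = ord(c)
--         w = max(7, o.bit_length())
--         pieces.append(''.join('1' if (o >> k) & 1 else '0' for k in range(w - 1, -1, -1)))
--     return ''.join(pieces)
-- ===== Notes on version B (the rewrite author's own statement) =====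
-- stated objective: alternative
-- what changed: Replaces bin()+[2:] plus a prepend-'0' padding while-loop and string-concatenation accumulation with a direct positional bit scan: per character compute width max(7, bit_length) and emit '1'/'0' for each bit position high-to-low, joining per-char pieces once.
import Mathlib
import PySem

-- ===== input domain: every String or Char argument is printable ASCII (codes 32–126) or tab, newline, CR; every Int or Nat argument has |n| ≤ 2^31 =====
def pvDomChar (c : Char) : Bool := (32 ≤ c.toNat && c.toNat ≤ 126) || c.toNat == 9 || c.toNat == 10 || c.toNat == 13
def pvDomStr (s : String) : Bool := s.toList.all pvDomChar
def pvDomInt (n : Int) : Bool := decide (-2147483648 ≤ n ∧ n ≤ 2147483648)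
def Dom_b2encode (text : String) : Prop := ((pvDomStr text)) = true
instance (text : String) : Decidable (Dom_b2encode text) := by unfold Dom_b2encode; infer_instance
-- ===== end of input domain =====

-- B replaces bin()+padding-loop+string concatenation with a per-character positional
-- bit scan (width max(7, bit_length)) joined once — an alternative decomposition, same cost.


-- ===== PORT A =====
-- while len(tmp) < 7: tmp = "0" + tmp   — fuel 7 suffices: each pass adds a char,
-- so after 7 passes the guard is surely false; otherwise identical to the loop.
def b2encodePad : Nat → List Char → List Char
  | 0, tmp => tmp
  | fuel + 1, tmp => if tmp.length < 7 then b2encodePad fuel ('0' :: tmp) else tmp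

def b2encode (text : String) : String :=
  -- bin(ord(i))[2:] : ord(i) ≥ 0 so bin gives "0b…" and [2:] is drop 2
  String.mk (text.toList.foldl
    (fun out i => out ++ b2encodePad 7 ((PySem.Int.toBinChars0b (i.toNat : Int)).drop 2)) [])

-- ===== PORT B =====
def b2encodeBits (o : Nat) : List Char :=
  (PySem.List.pyRange ((max 7 (PySem.Int.bitLength (o : Int)) : Nat) - 1) (-1) (-1)).map
    (fun k => if PySem.Int.band ((o : Int) >>> k.toNat) 1 ≠ 0 then '1' else '0')

def b2encode_alt (text : String) : String :=
  String.mk ((text.toList.map (fun c => b2encodeBits c.toNat)).flatten)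

-- ===== PRECONDITION & SPEC =====
def Spec_b2encode (text : String) (out : String) : Prop := out = b2encode_alt text
instance (text : String) (out : String) : Decidable (Spec_b2encode text out) := by unfold Spec_b2encode; infer_instance

-- ===== CLAIM (what is proved, stated in full; the proofs are below) =====
def Claim_equal_b2encode : Prop := ∀ (text : String), Dom_b2encode text → Spec_b2encode text (b2encode text)

-- ===== LEMMAS AND PROOFS =====

-- per-character agreement on the whole domain (codes ≤ 126)
lemma b2encode_char_eq : ∀ n : Nat, n < 127 →
    b2encodePad 7 ((PySem.Int.toBinChars0b (n : Int)).drop 2) = b2encodeBits n := by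
  decide

lemma b2encode_dom_char {c : Char} (h : pvDomChar c = true) : c.toNat < 127 := by
  simp [pvDomChar] at h
  omega

-- ===== VERDICT (by name: the statement is the Claim_ definition above) =====
theorem b2encode_spec : Claim_equal_b2encode := by
  intro text hdom
  unfold Spec_b2encode b2encode b2encode_alt
  rw [PySem.List.foldl_append_eq_flatMap]
  rw [List.nil_append, List.flatMap_def]
  refine congrArg String.mk (congrArg List.flatten (List.map_congr_left ?_))
  intro c hc
  have hall := (List.all_eq_true.mp hdom) c hc
  exact b2encode_char_eq c.toNat (b2encode_dom_char hall)
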